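-- pv_equiv track=rewrite | github.com/ctzsm/Tsunemori-Akane | Hackerrank/Ad Infinitum - Math Programming Contest March'14/A Very Special Multiple.py | check
-- ===== SOURCE A (Python) =====
-- def check(x, l):
--     rem, p, e = 0, 4, 10
--     while l:
--         if (l & 1) == 1:
--             rem = (rem * e + p) % x
--         p = (p * e + p) % x
--         e = (e * e) % x
--         l >>= 1
--     return rem == 0
-- ===== SOURCE B (Python) =====
-- def check(x, l):
--     if l == 0:
--         return True
--     # x divides the l-digit repdigit 44...4 = 4*(10**l - 1)//9  iff  9*x divides 4*(10**l - 1)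
--     return 4 * (pow(10, l, 9 * x) - 1) % (9 * x) == 0
-- ===== Notes on version B (the rewrite author's own statement) =====
-- stated objective: simpler
-- what changed: Replaces the hand-rolled fast-doubling loop over (rem, p, e) with the closed form: x divides the l-digit repdigit 44...4 iff 9x divides 4*(10^l - 1), computed with a single built-in pow(10, l, 9*x) call.
import Mathlib
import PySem

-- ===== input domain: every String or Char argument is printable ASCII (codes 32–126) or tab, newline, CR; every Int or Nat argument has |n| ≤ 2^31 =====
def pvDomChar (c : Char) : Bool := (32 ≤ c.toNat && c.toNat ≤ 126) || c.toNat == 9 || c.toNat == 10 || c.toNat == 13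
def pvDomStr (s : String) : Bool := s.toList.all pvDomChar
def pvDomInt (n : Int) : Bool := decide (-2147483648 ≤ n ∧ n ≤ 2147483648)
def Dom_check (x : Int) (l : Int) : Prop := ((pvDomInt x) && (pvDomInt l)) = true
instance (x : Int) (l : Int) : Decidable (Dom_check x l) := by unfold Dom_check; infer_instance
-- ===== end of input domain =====

-- B replaces A's hand-rolled fast-doubling loop with the closed form
-- x | 44…4 (l digits)  ⟺  9x | 4·(10^l − 1), one pow(10, l, 9x) call (simpler).
-- Return-value equivalence only (no argument is mutated).

-- ===== PORT A =====
-- `while l:` with `l >>= 1`; the stopping guard is `l ≤ 0` rather than `l = 0` only to make the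
-- recursion total: on negative l Python diverges, which Pre_check excludes.
def checkLoop (x rem p e l : Int) : Int :=
  if l ≤ 0 then rem
  else
    checkLoop x
      (if PySem.Int.band l 1 == 1 then PySem.Int.mod (rem * e + p) x else rem)
      (PySem.Int.mod (p * e + p) x) (PySem.Int.mod (e * e) x) (l >>> (1 : Nat))
  termination_by l.toNat
  decreasing_by
    rw [Int.shiftRight_eq_div_pow]
    simp only [pow_one]
    omega

def check (x : Int) (l : Int) : Bool :=
  checkLoop x 0 4 10 l == 0

-- ===== PORT B =====
-- pow(10, l, 9*x): the exponent is l.toNat — Pre_check has 0 ≤ l (Python pow with a negative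
-- exponent and a modulus is a different operation, never reached inside Pre_).
def check_alt (x : Int) (l : Int) : Bool :=
  if l == 0 then true
  else PySem.Int.mod (4 * (PySem.Int.powMod 10 l.toNat (9 * x) - 1)) (9 * x) == 0

-- ===== PRECONDITION & SPEC =====
-- Pre_ excludes exactly the inputs on which Python A does not return: l < 0 (infinite loop, since
-- `l >>= 1` on a negative int stalls at -1) and x = 0 with l ≠ 0 (ZeroDivisionError).
def Pre_check (x : Int) (l : Int) : Prop := 0 ≤ l ∧ (x ≠ 0 ∨ l = 0)
instance (x : Int) (l : Int) : Decidable (Pre_check x l) := by unfold Pre_check; infer_instance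
def pvWitness_check : Int × Int := (3, 4)

def Spec_check (x : Int) (l : Int) (out : Bool) : Prop := out = check_alt x l
instance (x : Int) (l : Int) (out : Bool) : Decidable (Spec_check x l out) := by unfold Spec_check; infer_instance

-- ===== CLAIM (what is proved, stated in full; the proofs are below) =====
def Claim_equal_check : Prop := ∀ (x : Int) (l : Int), Dom_check x l → Pre_check x l → Spec_check x l (check x l)

-- ===== LEMMAS AND PROOFS =====

-- value of the n-digit repdigit 44…4
def repd : Nat → Int
  | 0 => 0
  | n + 1 => 10 * repd n + 4

lemma repd_add (a b : Nat) : repd (a + b) = repd a * 10 ^ b + repd b := by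
  induction b with
  | zero => simp [repd]
  | succ b ih =>
    rw [← Nat.add_assoc]
    simp only [repd, ih, pow_succ]
    ring

lemma mod_modeq (a x : Int) : PySem.Int.mod a x ≡ a [ZMOD x] := by
  have h := PySem.Int.floordiv_mul_add_mod a x
  exact Int.modEq_iff_dvd.mpr ⟨PySem.Int.floordiv a x, by linarith⟩

lemma mod_congr {x a b : Int} (h : a ≡ b [ZMOD x]) :
    PySem.Int.mod a x = PySem.Int.mod b x := by
  obtain ⟨k, hk⟩ := Int.modEq_iff_dvd.mp h
  have hb : b = a + x * k := by linarith
  simp only [PySem.Int.mod, hb, Int.add_mul_fmod_self_left]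

lemma shiftRight_one (l : Int) : (l >>> (1 : Nat)) = l / 2 := by
  rw [Int.shiftRight_eq_div_pow]; norm_num

-- A's loop invariant: with rem ≡ repd a, p ≡ repd m, e ≡ 10^m (mod x) and l > 0,
-- the loop returns exactly (repd (a + l*m)) % x.
lemma checkLoop_eq (x : Int) : ∀ n : Nat, ∀ l rem p e : Int, l.toNat = n → 0 < l →
    ∀ a m : Nat, rem ≡ repd a [ZMOD x] → p ≡ repd m [ZMOD x] → e ≡ (10 : Int) ^ m [ZMOD x] →
    checkLoop x rem p e l = PySem.Int.mod (repd (a + l.toNat * m)) x := by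
  intro n
  induction n using Nat.strong_induction_on with
  | _ n ih =>
    intro l rem p e hn hl a m hrem hp he
    rw [checkLoop, if_neg (by omega)]
    have hdm := PySem.Int.floordiv_mul_add_mod l 2
    have hm2 := PySem.Int.mod_two_eq l
    have hfd : (l >>> (1 : Nat)) = PySem.Int.floordiv l 2 := by
      rw [shiftRight_one, PySem.Int.floordiv_eq_ediv_of_pos (by norm_num)]
    have hrem1 : rem * e + p ≡ repd (a + m) [ZMOD x] := by
      rw [repd_add]; exact Int.ModEq.add (Int.ModEq.mul hrem he) hp
    have hp' : PySem.Int.mod (p * e + p) x ≡ repd (m + m) [ZMOD x] := by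
      refine (mod_modeq _ _).trans ?_
      rw [repd_add]; exact Int.ModEq.add (Int.ModEq.mul hp he) hp
    have he' : PySem.Int.mod (e * e) x ≡ (10 : Int) ^ (m + m) [ZMOD x] := by
      refine (mod_modeq _ _).trans ?_
      rw [pow_add]; exact Int.ModEq.mul he he
    by_cases h2 : PySem.Int.floordiv l 2 ≤ 0
    · -- last iteration: l = 1, and the low bit is set
      have hl1 : l = 1 := by rcases hm2 with h | h <;> omega
      subst hl1
      have hb : (PySem.Int.band (1 : Int) 1 == 1) = true := by decide
      have h10 : ((1 : Int) >>> (1 : Nat)) = 0 := by decide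
      rw [hb, if_pos rfl, h10, checkLoop, if_pos (le_refl 0)]
      rw [show a + (1 : Int).toNat * m = a + m by simp]
      exact mod_congr hrem1
    · -- recurse on l >> 1
      have h2' : 0 < PySem.Int.floordiv l 2 := lt_of_not_ge h2
      rw [hfd]
      rcases hm2 with hb0 | hb1
      · -- low bit clear
        have hb : (PySem.Int.band l 1 == 1) = false := by
          rw [PySem.Int.band_one, hb0]; decide
        rw [hb, if_neg (by simp)]
        rw [ih (PySem.Int.floordiv l 2).toNat (by omega) _ _ _ _ rfl h2' a (m + m)
          hrem hp' he']
        have hk : l.toNat = 2 * (PySem.Int.floordiv l 2).toNat := by omega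
        rw [show a + (PySem.Int.floordiv l 2).toNat * (m + m) = a + l.toNat * m by
          rw [hk]; ring]
      · -- low bit set
        have hb : (PySem.Int.band l 1 == 1) = true := by
          rw [PySem.Int.band_one, hb1]; decide
        rw [hb, if_pos rfl]
        have hrem' : PySem.Int.mod (rem * e + p) x ≡ repd (a + m) [ZMOD x] :=
          (mod_modeq _ _).trans hrem1
        rw [ih (PySem.Int.floordiv l 2).toNat (by omega) _ _ _ _ rfl h2' (a + m) (m + m)
          hrem' hp' he']
        have hk : l.toNat = 2 * (PySem.Int.floordiv l 2).toNat + 1 := by omega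
        rw [show a + m + (PySem.Int.floordiv l 2).toNat * (m + m) = a + l.toNat * m by
          rw [hk]; ring]

-- 9 · repd n = 4 · (10^n − 1)
lemma nine_repd (n : Nat) : 9 * repd n = 4 * (10 ^ n - 1) := by
  induction n with
  | zero => simp [repd]
  | succ n ih => simp only [repd, pow_succ]; linarith

-- ===== VERDICT (by name: the statement is the Claim_ definition above) =====
theorem check_spec : Claim_equal_check := by
  intro x l _ hpre
  unfold Spec_check
  obtain ⟨hl0, _⟩ := hpre
  obtain ⟨n, rfl⟩ := Int.eq_ofNat_of_zero_le hl0
  unfold check check_alt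
  rcases Nat.eq_zero_or_pos n with h0 | hpos
  · subst h0
    rw [checkLoop, if_pos (by simp)]
    simp
  · rw [checkLoop_eq x n (↑n) 0 4 10 (by simp) (by exact_mod_cast hpos) 0 1
      (by simp [repd]) (by simp [repd]) (by norm_num)]
    rw [if_neg (by simp; omega)]
    simp only [Int.toNat_natCast, zero_add, mul_one]
    rw [Bool.eq_iff_iff]
    simp only [beq_iff_eq, PySem.Int.mod_eq_zero_iff_dvd]
    have hpm : (9 * x) ∣ (4 * (PySem.Int.powMod 10 n (9 * x) - 1)) ↔
        (9 * x) ∣ (4 * ((10 : Int) ^ n - 1)) := by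
      have h : 4 * (PySem.Int.powMod 10 n (9 * x) - 1) ≡ 4 * ((10 : Int) ^ n - 1)
          [ZMOD 9 * x] := ((mod_modeq _ _).sub_right 1).mul_left 4
      rw [← Int.modEq_zero_iff_dvd, ← Int.modEq_zero_iff_dvd]
      exact ⟨h.symm.trans, h.trans⟩
    rw [hpm, ← nine_repd]
    exact (mul_dvd_mul_iff_left (by norm_num : (9 : Int) ≠ 0)).symm
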